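-- pv_equiv track=rewrite | github.com/mutjin08/Cote | epper/모의테스트/sample7.py | solution
-- ===== SOURCE A (Python) =====
-- def solution(s):
--     answer = 0
--     cnt = 0
--     for i in range(len(s)):
--         if s[i]=="O":
--             cnt+=1
--         else:
--             cnt=0
--         answer+=cnt
--     return answer
-- ===== SOURCE B (Python) =====
-- from itertools import groupby
--
-- def solution(s):
--     total = 0
--     for ch, grp in groupby(s):
--         if ch == 'O':
--             L = sum(1 for _ in grp)
--             total += L * (L + 1) // 2
--     return total
-- ===== Notes on version B (the rewrite author's own statement) =====
-- stated objective: idiomatic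
-- what changed: Replaced the per-character running-count accumulator with itertools.groupby run-grouping: for each maximal 'O' run of length L, add the closed-form triangular number L*(L+1)//2.
import Mathlib
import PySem

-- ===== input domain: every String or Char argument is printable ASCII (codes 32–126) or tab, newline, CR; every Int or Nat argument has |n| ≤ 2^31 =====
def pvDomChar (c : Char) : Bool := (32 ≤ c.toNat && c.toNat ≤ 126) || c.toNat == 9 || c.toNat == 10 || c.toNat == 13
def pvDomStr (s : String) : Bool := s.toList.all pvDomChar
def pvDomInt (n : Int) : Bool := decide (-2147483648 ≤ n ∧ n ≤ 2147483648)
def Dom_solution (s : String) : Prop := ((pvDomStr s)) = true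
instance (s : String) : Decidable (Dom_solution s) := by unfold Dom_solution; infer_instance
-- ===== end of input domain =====

-- B replaces A's per-character running-count accumulator by grouping the string into
-- maximal runs and adding the closed-form triangular number for each 'O' run (objective: idiomatic).

-- ===== PORT A =====
-- A: one pass keeping (answer, cnt); cnt increments on 'O', resets otherwise; answer += cnt each step.
def solution (s : String) : Int :=
  (s.toList.foldl
    (fun (st : Int × Int) ch =>
      let cnt := if ch = 'O' then st.2 + 1 else 0
      (st.1 + cnt, cnt))
    (0, 0)).1

-- ===== PORT B =====
-- B: iterate over maximal runs (groupby); for an 'O' run of length L add L*(L+1)//2.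
def solAltRuns : List Char → Int
  | [] => 0
  | c :: t =>
    if c = 'O' then
      let L : Int := ((t.takeWhile (· == 'O')).length : Int) + 1
      PySem.Int.floordiv (L * (L + 1)) 2 + solAltRuns (t.dropWhile (· == 'O'))
    else
      solAltRuns t
  termination_by l => l.length
  decreasing_by
    · exact Nat.lt_succ_of_le (t.length_dropWhile_le _)
    · simp

def solution_alt (s : String) : Int := solAltRuns s.toList

-- ===== PRECONDITION & SPEC =====
def Spec_solution (s : String) (out : Int) : Prop := out = solution_alt s
instance (s : String) (out : Int) : Decidable (Spec_solution s out) := by unfold Spec_solution; infer_instance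

-- ===== CLAIM (what is proved, stated in full; the proofs are below) =====
def Claim_equal_solution : Prop := ∀ (s : String), Dom_solution s → Spec_solution s (solution s)

-- ===== LEMMAS AND PROOFS =====

def pvTri (x : Int) : Int := PySem.Int.floordiv (x * (x + 1)) 2

def pvLead (l : List Char) : Int := ((l.takeWhile (· == 'O')).length : Int)

theorem pvTri_succ (n : Int) : pvTri (n + 1) = pvTri n + (n + 1) := by
  unfold pvTri
  rw [PySem.Int.floordiv_eq_ediv_of_pos (by omega : (0:Int) < 2),
      PySem.Int.floordiv_eq_ediv_of_pos (by omega : (0:Int) < 2)]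
  have h : (n + 1) * (n + 1 + 1) = n * (n + 1) + 2 * (n + 1) := by ring
  rw [h]
  omega

theorem solAltRuns_drop (l : List Char) :
    solAltRuns l = pvTri (pvLead l) + solAltRuns (l.dropWhile (· == 'O')) := by
  cases l with
  | nil => simp [solAltRuns, pvTri, pvLead, PySem.Int.floordiv]
  | cons c t =>
    by_cases h : c = 'O'
    · subst h
      have hd : (('O' :: t).dropWhile (· == 'O')) = t.dropWhile (· == 'O') := by
        simp [List.dropWhile]
      have hl : pvLead ('O' :: t) = pvLead t + 1 := by
        simp [pvLead, List.takeWhile]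
      rw [solAltRuns, if_pos rfl, hd, hl]
      rfl
    · have hb : (c == 'O') = false := by simp [h]
      have hd : ((c :: t).dropWhile (· == 'O')) = c :: t := by
        simp [List.dropWhile, hb]
      have hl : pvLead (c :: t) = 0 := by simp [pvLead, List.takeWhile, hb]
      rw [hd, hl]
      have h0 : pvTri 0 = 0 := by decide
      rw [h0]
      ring

theorem pvFold_eq (l : List Char) : ∀ (a c : Int),
    (l.foldl
      (fun (st : Int × Int) ch =>
        let cnt := if ch = 'O' then st.2 + 1 else 0
        (st.1 + cnt, cnt))
      (a, c)).1 = a + c * pvLead l + solAltRuns l := by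
  induction l with
  | nil => intro a c; simp [pvLead, solAltRuns]
  | cons ch t ih =>
    intro a c
    by_cases h : ch = 'O'
    · subst h
      have h1 := solAltRuns_drop ('O' :: t)
      have h2 := solAltRuns_drop t
      have hl : pvLead ('O' :: t) = pvLead t + 1 := by
        simp [pvLead, List.takeWhile]
      have hd : (('O' :: t).dropWhile (· == 'O')) = t.dropWhile (· == 'O') := by
        simp [List.dropWhile]
      rw [hl, hd] at h1
      simp only [List.foldl_cons]
      rw [ih, h1, hl, pvTri_succ, h2]
      simp
      ring
    · have h1 : solAltRuns (ch :: t) = solAltRuns t := by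
        rw [solAltRuns]; simp [h]
      have hl : pvLead (ch :: t) = 0 := by
        have hb : (ch == 'O') = false := by simp [h]
        simp [pvLead, List.takeWhile, hb]
      simp only [List.foldl_cons, if_neg h]
      rw [ih, h1, hl]
      ring

-- ===== VERDICT (by name: the statement is the Claim_ definition above) =====
theorem solution_spec : Claim_equal_solution := by
  intro s _
  unfold Spec_solution solution solution_alt
  rw [pvFold_eq]
  ring
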